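-- pv_equiv track=rewrite | github.com/jhonat23/python_scripts | challenges/find_even_index.py | find_even_index
-- ===== SOURCE A (Python) =====
-- def find_even_index(arr):
--     sum_left = 0
--     sum_rigth = 0
--     for i in range(len(arr)):
--         sum_left = sum(arr[:i])
--         sum_rigth = sum(arr[i+1:])
--         if sum_left == sum_rigth:
--             return i
--         elif i == len(arr)  -1 :
--             return -1
-- ===== SOURCE B (Python) =====
-- def find_even_index(arr):
--     left = 0
--     right = sum(arr)
--     for i, v in enumerate(arr):
--         right -= v
--         if left == right:
--             return i
--         left += v
--     return -1
-- ===== Notes on version B (the rewrite author's own statement) =====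
-- stated objective: faster
-- what changed: Replaced per-index re-summation of both slices with running left/right prefix sums maintained in one pass.
-- outside the precondition, e.g. on find_even_index([]): A returns None, B returns -1
import Mathlib
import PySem

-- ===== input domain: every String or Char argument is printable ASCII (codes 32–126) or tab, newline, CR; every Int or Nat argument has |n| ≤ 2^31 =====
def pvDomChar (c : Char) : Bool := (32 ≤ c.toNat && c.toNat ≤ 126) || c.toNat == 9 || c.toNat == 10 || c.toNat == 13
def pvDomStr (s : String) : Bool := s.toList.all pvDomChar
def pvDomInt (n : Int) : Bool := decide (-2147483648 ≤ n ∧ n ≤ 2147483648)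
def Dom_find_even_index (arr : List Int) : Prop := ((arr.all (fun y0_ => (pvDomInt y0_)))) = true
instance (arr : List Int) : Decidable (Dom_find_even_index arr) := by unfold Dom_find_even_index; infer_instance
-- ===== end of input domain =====

-- B replaces A's per-index re-summation of both slices (O(n^2)) with running
-- left/right sums maintained in a single pass (O(n)); Pre_ excludes the empty
-- list, on which A falls off the loop and returns None (no int).


-- ===== PORT A =====
-- the for-loop of A: i runs over range(len arr); each step re-sums arr[:i] and arr[i+1:]
def findEvenLoopA (arr : List Int) (i : Nat) : Int :=
  if h : i < arr.length then
    let sum_left := (PySem.List.slice arr none (some (i : Int))).sum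
    let sum_rigth := (PySem.List.slice arr (some ((i : Int) + 1)) none).sum
    if sum_left == sum_rigth then (i : Int)
    else if (i : Int) == (arr.length : Int) - 1 then -1
    else findEvenLoopA arr (i + 1)
  else -1   -- loop exhausted without returning: only reachable for arr = [] (outside Pre_)
termination_by arr.length - i

def find_even_index (arr : List Int) : Int := findEvenLoopA arr 0

-- ===== PORT B =====
-- B's single pass: left/right running sums, structural recursion over the list
def findEvenLoopB (i left right : Int) : List Int → Int
  | [] => -1
  | v :: rest =>
    let right' := right - v
    if left == right' then i
    else findEvenLoopB (i + 1) (left + v) right' rest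

def find_even_index_alt (arr : List Int) : Int := findEvenLoopB 0 0 arr.sum arr

-- ===== PRECONDITION & SPEC =====
-- Pre_ excludes only the empty list: there A returns None (not an int value); B returns -1.
def Pre_find_even_index (arr : List Int) : Prop := arr ≠ []
instance (arr : List Int) : Decidable (Pre_find_even_index arr) := by unfold Pre_find_even_index; infer_instance
def pvWitness_find_even_index : List Int := [1, 2, 3, 3]

def Spec_find_even_index (arr : List Int) (out : Int) : Prop := out = find_even_index_alt arr
instance (arr : List Int) (out : Int) : Decidable (Spec_find_even_index arr out) := by unfold Spec_find_even_index; infer_instance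

-- ===== CLAIM (what is proved, stated in full; the proofs are below) =====
def Claim_equal_find_even_index : Prop := ∀ (arr : List Int), Dom_find_even_index arr → Pre_find_even_index arr → Spec_find_even_index arr (find_even_index arr)

-- ===== LEMMAS AND PROOFS =====

lemma findEvenLoopB_cons (i left right v : Int) (rest : List Int) :
    findEvenLoopB i left right (v :: rest) =
      if left = right - v then i else findEvenLoopB (i + 1) (left + v) (right - v) rest := by
  simp [findEvenLoopB]

lemma findEven_loop_eq (arr : List Int) (i : Nat) (h : i < arr.length) :
    findEvenLoopA arr i =
      findEvenLoopB (i : Int) ((arr.take i).sum) ((arr.drop i).sum) (arr.drop i) := by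
  have hdrop : arr.drop i = arr[i] :: arr.drop (i + 1) := List.drop_eq_getElem_cons h
  have hsl : PySem.List.slice arr none (some (i : Int)) = arr.take i :=
    PySem.List.slice_to_natCast arr i
  have hsr : PySem.List.slice arr (some ((i : Int) + 1)) none = arr.drop (i + 1) := by
    have hcast : ((i : Int) + 1) = ((i + 1 : Nat) : Int) := by push_cast; ring
    rw [hcast]; exact PySem.List.slice_from_natCast arr (i + 1)
  have hsum : (arr[i] :: arr.drop (i + 1)).sum - arr[i] = (arr.drop (i + 1)).sum := by
    rw [List.sum_cons]; ring
  conv_rhs => rw [hdrop]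
  rw [findEvenLoopA, dif_pos h, findEvenLoopB_cons, hsl, hsr, hsum]
  simp only [beq_iff_eq]
  by_cases hc : (arr.take i).sum = (arr.drop (i + 1)).sum
  · rw [if_pos hc, if_pos hc]
  · rw [if_neg hc, if_neg hc]
    by_cases hlast : i = arr.length - 1
    · have hdone : arr.drop (i + 1) = [] := by
        apply List.drop_eq_nil_of_le; omega
      have hi : ((i : Int) = (arr.length : Int) - 1) := by omega
      rw [if_pos hi, hdone]
      rfl
    · have hne : ¬ ((i : Int) = (arr.length : Int) - 1) := by omega
      rw [if_neg hne]
      have hlt : i + 1 < arr.length := by omega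
      rw [findEven_loop_eq arr (i + 1) hlt, List.sum_take_succ arr i h]
      push_cast
      ring_nf
termination_by arr.length - i

-- ===== VERDICT (by name: the statement is the Claim_ definition above) =====
theorem find_even_index_spec : Claim_equal_find_even_index := by
  intro arr _ hpre
  unfold Spec_find_even_index find_even_index find_even_index_alt
  have h0 : 0 < arr.length := List.length_pos_iff.mpr hpre
  have := findEven_loop_eq arr 0 h0
  simpa using this
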